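-- pv_equiv track=rewrite | github.com/TuubaLord/junction2025 | parse_EBA.py | guess_document_title
-- ===== SOURCE A (Python) =====
-- from typing import List, Dict, Any
--
-- def guess_document_title(paragraphs: List[str]) -> str:
--     """
--     Try to find the main title, typically a line with 'Guidelines ...'.
--     Fallback: first non-empty paragraph.
--     """
--     for p in paragraphs[:50]:
--         if "Guidelines" in p or "GUIDELINES" in p:
--             return p.strip()
--     for p in paragraphs:
--         if p.strip():
--             return p.strip()
--     return ""
-- ===== SOURCE B (Python) =====
-- from typing import List, Dict, Any
--
-- def guess_document_title(paragraphs: List[str]) -> str: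
--     """Single fused pass: return early on a 'Guidelines' line among the first 50,
--     while remembering the first non-empty stripped paragraph as fallback."""
--     first_nonempty = None
--     for i, p in enumerate(paragraphs):
--         if i < 50 and ("Guidelines" in p or "GUIDELINES" in p):
--             return p.strip()
--         if first_nonempty is None:
--             s = p.strip()
--             if s:
--                 first_nonempty = s
--     return first_nonempty if first_nonempty is not None else ""
-- ===== Notes on version B (the rewrite author's own statement) =====
-- stated objective: alternative
-- what changed: A's two sequential scans (first-50 'Guidelines' search, then whole-list first-non-empty fallback) are fused into one enumerate loop that returns early on a match and maintains the fallback in an accumulator.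
import Mathlib
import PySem

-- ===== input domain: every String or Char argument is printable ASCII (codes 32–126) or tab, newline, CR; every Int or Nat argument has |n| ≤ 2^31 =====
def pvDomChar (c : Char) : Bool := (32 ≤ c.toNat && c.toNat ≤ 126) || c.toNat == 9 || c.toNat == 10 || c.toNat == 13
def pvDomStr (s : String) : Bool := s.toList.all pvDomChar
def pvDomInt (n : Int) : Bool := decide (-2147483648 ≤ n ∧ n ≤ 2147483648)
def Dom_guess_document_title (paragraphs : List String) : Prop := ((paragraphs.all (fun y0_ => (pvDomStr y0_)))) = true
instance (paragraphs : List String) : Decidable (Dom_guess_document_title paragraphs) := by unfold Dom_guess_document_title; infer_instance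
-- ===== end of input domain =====

-- B fuses A's two sequential scans into one loop with a fallback accumulator; same cost, different decomposition.

-- ===== PORT A =====
-- first loop: return p.strip() on the first paragraph (of the first 50) containing 'Guidelines'/'GUIDELINES'
def pvALoop1 : List String → Option String
  | [] => none
  | p :: rest =>
    if PySem.Str.isIn "Guidelines" p || PySem.Str.isIn "GUIDELINES" p then some (PySem.Str.strip p)
    else pvALoop1 rest

-- second loop: return the first non-empty p.strip()
def pvALoop2 : List String → Option String
  | [] => none
  | p :: rest =>
    if PySem.Str.strip p = "" then pvALoop2 rest else some (PySem.Str.strip p)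

def guess_document_title (paragraphs : List String) : String :=
  match pvALoop1 (paragraphs.take 50) with   -- paragraphs[:50]
  | some t => t
  | none =>
    match pvALoop2 paragraphs with
    | some t => t
    | none => ""

-- ===== PORT B =====
-- single enumerate loop: i is the index, acc the first non-empty stripped paragraph seen so far
def pvBLoop : List String → Nat → Option String → String
  | [], _, acc => acc.getD ""
  | p :: rest, i, acc =>
    if decide (i < 50) && (PySem.Str.isIn "Guidelines" p || PySem.Str.isIn "GUIDELINES" p) then
      PySem.Str.strip p
    else
      pvBLoop rest (i + 1)
        (match acc with
         | some a => some a
         | none => if PySem.Str.strip p = "" then none else some (PySem.Str.strip p))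

def guess_document_title_alt (paragraphs : List String) : String :=
  pvBLoop paragraphs 0 none

-- ===== PRECONDITION & SPEC =====
def Spec_guess_document_title (paragraphs : List String) (out : String) : Prop := out = guess_document_title_alt paragraphs
instance (paragraphs : List String) (out : String) : Decidable (Spec_guess_document_title paragraphs out) := by unfold Spec_guess_document_title; infer_instance

-- ===== CLAIM (what is proved, stated in full; the proofs are below) =====
def Claim_equal_guess_document_title : Prop := ∀ (paragraphs : List String), Dom_guess_document_title paragraphs → Spec_guess_document_title paragraphs (guess_document_title paragraphs)

-- ===== LEMMAS AND PROOFS =====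

-- invariant of B's fused loop: it equals A's first scan over the remaining i-budget,
-- falling back to the accumulator or A's second scan
theorem pvBLoop_eq (ps : List String) : ∀ (i : Nat) (acc : Option String),
    pvBLoop ps i acc =
      match pvALoop1 (ps.take (50 - i)) with
      | some t => t
      | none =>
        match acc with
        | some a => a
        | none => (pvALoop2 ps).getD "" := by
  induction ps with
  | nil =>
    intro i acc
    rw [List.take_nil]
    cases acc <;> rfl
  | cons p rest ih =>
    intro i acc
    by_cases hi : i < 50
    · have htake : (p :: rest).take (50 - i) = p :: rest.take (50 - (i + 1)) := by
        have h : 50 - i = (50 - (i + 1)) + 1 := by omega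
        rw [h, List.take_succ_cons]
      rw [htake]
      by_cases hc : (PySem.Str.isIn "Guidelines" p || PySem.Str.isIn "GUIDELINES" p) = true
      · -- guard fires: both sides return strip p
        simp only [pvBLoop, pvALoop1, hc, decide_eq_true hi, Bool.true_and, if_true]
      · -- no match in p: recurse, window shrinks by one
        rw [Bool.not_eq_true] at hc
        simp only [pvBLoop, pvALoop1, hc, Bool.and_false, Bool.false_eq_true, if_false]
        rw [ih]
        cases acc with
        | some a => cases pvALoop1 (rest.take (50 - (i + 1))) <;> rfl
        | none =>
          by_cases hs : PySem.Str.strip p = ""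
          · simp only [pvALoop2, if_pos hs]
          · simp only [pvALoop2, if_neg hs]
            cases pvALoop1 (rest.take (50 - (i + 1))) <;> rfl
    · -- i ≥ 50: guard off, first-50 window empty on both sides
      have htake : (p :: rest).take (50 - i) = ([] : List String) := by
        have h : 50 - i = 0 := by omega
        rw [h, List.take_zero]
      have htake' : rest.take (50 - (i + 1)) = ([] : List String) := by
        have h : 50 - (i + 1) = 0 := by omega
        rw [h, List.take_zero]
      rw [htake]
      simp only [pvBLoop, decide_eq_false hi, Bool.false_and, Bool.false_eq_true, if_false]
      rw [ih, htake']
      cases acc with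
      | some a => rfl
      | none =>
        by_cases hs : PySem.Str.strip p = ""
        · simp only [pvALoop1, pvALoop2, if_pos hs]
        · simp only [pvALoop1, pvALoop2, if_neg hs]
          rfl

-- ===== VERDICT (by name: the statement is the Claim_ definition above) =====
theorem guess_document_title_spec : Claim_equal_guess_document_title := by
  intro ps _
  unfold Spec_guess_document_title guess_document_title guess_document_title_alt
  rw [pvBLoop_eq]
  simp only [Nat.sub_zero]
  cases pvALoop1 (ps.take 50) with
  | some t => rfl
  | none => cases pvALoop2 ps <;> rfl
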